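-- pv_equiv track=rewrite | github.com/docu3c/Trademark-application | trademark_application/utils/text_processing.py | replace_disallowed_words
-- ===== SOURCE A (Python) =====
-- def replace_disallowed_words(text: str) -> str:
--     """Replace disallowed words with placeholders"""
--     disallowed_words = {
--         "sexual": "xxxxxx",
--         "sex": "xxx",
--     }
--     for word, replacement in disallowed_words.items():
--         text = text.replace(word, replacement)
--     # Ensure single paragraph output
--     text = " ".join(text.split())
--     return text
-- ===== SOURCE B (Python) =====
-- def replace_disallowed_words(text: str) -> str:
--     """Replace disallowed words with placeholders in one left-to-right scan
--     (longest word first), then collapse whitespace to a single paragraph."""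
--     replacements = {"sexual": "xxxxxx", "sex": "xxx"}  # longest key first
--     out = []
--     i = 0
--     n = len(text)
--     while i < n:
--         for word, placeholder in replacements.items():
--             if text.startswith(word, i):
--                 out.append(placeholder)
--                 i += len(word)
--                 break
--         else:
--             out.append(text[i])
--             i += 1
--     return " ".join("".join(out).split())
-- ===== Notes on version B (the rewrite author's own statement) =====
-- stated objective: alternative
-- what changed: B replaces A's two sequential full-text str.replace passes with a single left-to-right longest-match scan over the disallowed words, keeping the final whitespace normalization.
-- intended difference: On texts containing the substring 'sesexual', A's second pass matches 'sex' across the seam of its own first replacement ('se'+'xxxxxx') and blanks out the innocent characters 'se' (A('sesexual')='xxxxxxxx'); B replaces only the actual disallowed word, returning 'sexxxxxx', which is the intended behaviour. — e.g. on replace_disallowed_words("sesexual"): A returns "xxxxxxxx", B returns "sexxxxxx"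
import Mathlib
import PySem

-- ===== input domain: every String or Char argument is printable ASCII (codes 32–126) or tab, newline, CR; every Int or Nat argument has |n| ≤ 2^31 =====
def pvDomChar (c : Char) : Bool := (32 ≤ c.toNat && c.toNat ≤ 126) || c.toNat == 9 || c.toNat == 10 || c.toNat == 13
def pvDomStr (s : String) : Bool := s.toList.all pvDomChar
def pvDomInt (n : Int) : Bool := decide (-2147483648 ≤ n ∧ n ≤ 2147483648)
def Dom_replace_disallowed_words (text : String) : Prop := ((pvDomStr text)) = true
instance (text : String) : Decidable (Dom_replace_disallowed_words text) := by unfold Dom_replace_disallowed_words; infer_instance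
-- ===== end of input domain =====

-- B replaces A's two sequential full-text str.replace passes by one left-to-right
-- longest-match scan; objective: alternative (one scan instead of two, same cost).

-- ===== PORT A =====
def replace_disallowed_words (text : String) : String :=
  -- for word, replacement in {"sexual": "xxxxxx", "sex": "xxx"}.items(): text = text.replace(word, replacement)
  let t1 := PySem.Str.replace text "sexual" "xxxxxx"
  let t2 := PySem.Str.replace t1 "sex" "xxx"
  -- text = " ".join(text.split())
  PySem.Str.join " " (PySem.Str.split₀ t2)

-- ===== PORT B =====
-- the while-loop of Source B: one scan; the inner for over the two dict items is unrolled
-- into its two prefix checks ("sexual" first, then "sex"), else copy one char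
def pvScan : List Char → List Char
  | [] => []
  | c :: t =>
    if ("sexual".toList).isPrefixOf (c :: t) then "xxxxxx".toList ++ pvScan (t.drop 5)
    else if ("sex".toList).isPrefixOf (c :: t) then "xxx".toList ++ pvScan (t.drop 2)
    else c :: pvScan t
termination_by l => l.length
decreasing_by all_goals (simp; try omega)

def replace_disallowed_words_alt (text : String) : String :=
  PySem.Str.join " " (PySem.Str.split₀ (String.ofList (pvScan text.toList)))

-- ===== PRECONDITION & SPEC =====
-- On texts containing "sesexual", A's second pass re-matches "sex" across the seam of the
-- first pass's own replacement ("se" + "xxxxxx"), so A blanks out the innocent characters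
-- "se" (e.g. A("sesexual") = "xxxxxxxx"); B replaces only the actual occurrence of the
-- disallowed word, returning "sexxxxxx", which is the intended behaviour.
-- linear substring test for "sesexual", by direct pattern match on the characters
-- (kept cheap to decide on large inputs)
def pvHasSesexual : List Char → Bool
  | 's'::'e'::'s'::'e'::'x'::'u'::'a'::'l':: _ => true
  | _ :: t => pvHasSesexual t
  | [] => false

def D_replace_disallowed_words (text : String) : Prop :=
  pvHasSesexual text.toList = true
instance (text : String) : Decidable (D_replace_disallowed_words text) := by
  unfold D_replace_disallowed_words; infer_instance

def Spec_replace_disallowed_words (text : String) (out : String) : Prop :=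
  ¬ D_replace_disallowed_words text → out = replace_disallowed_words_alt text
instance (text : String) (out : String) : Decidable (Spec_replace_disallowed_words text out) := by
  unfold Spec_replace_disallowed_words; infer_instance

def pvDiffWitness_replace_disallowed_words : String := "sesexual"
def pvDiffWitnessOut_replace_disallowed_words : String × String := ("xxxxxxxx", "sexxxxxx")

-- ===== CLAIM (what is proved, stated in full; the proofs are below) =====
def Claim_unchanged_replace_disallowed_words : Prop :=
  ∀ (text : String), Dom_replace_disallowed_words text →
    Spec_replace_disallowed_words text (replace_disallowed_words text)
def Claim_changed_replace_disallowed_words : Prop :=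
  Dom_replace_disallowed_words (pvDiffWitness_replace_disallowed_words) ∧
  D_replace_disallowed_words (pvDiffWitness_replace_disallowed_words) ∧
  replace_disallowed_words (pvDiffWitness_replace_disallowed_words) = pvDiffWitnessOut_replace_disallowed_words.1 ∧
  replace_disallowed_words_alt (pvDiffWitness_replace_disallowed_words) = pvDiffWitnessOut_replace_disallowed_words.2 ∧
  pvDiffWitnessOut_replace_disallowed_words.1 ≠ pvDiffWitnessOut_replace_disallowed_words.2
def Claim_exact_replace_disallowed_words : Prop :=
  ∀ (text : String), Dom_replace_disallowed_words text →
    D_replace_disallowed_words text →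
      replace_disallowed_words text ≠ replace_disallowed_words_alt text

-- ===== LEMMAS AND PROOFS =====

theorem pvBF {b : Bool} (h : ¬ b = true) : b = false := by
  cases b with
  | false => rfl
  | true => exact absurd rfl h

-- string-literal `.toList` values, as plain char lists
theorem pvLitSexual : "sexual".toList = ['s','e','x','u','a','l'] := by decide
theorem pvLitSex : "sex".toList = ['s','e','x'] := by decide
theorem pvLitX6 : "xxxxxx".toList = ['x','x','x','x','x','x'] := by decide
theorem pvLitX3 : "xxx".toList = ['x','x','x'] := by decide

-- normal form of PySem.Chars.replace.go: the accumulator factors out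
theorem pvGoNorm (old new : List Char) (h : old ≠ []) :
    ∀ fuel l acc, l.length ≤ fuel →
      PySem.Chars.replace.go old new fuel l acc
        = acc.reverse ++ PySem.Chars.replace.go old new l.length l [] := by
  intro fuel
  induction fuel using Nat.strong_induction_on with
  | _ fuel ih =>
    intro l acc hl
    cases fuel with
    | zero =>
      have hnil : l = [] := List.eq_nil_of_length_eq_zero (Nat.le_zero.mp hl)
      subst hnil
      simp [PySem.Chars.replace.go]
    | succ f =>
      cases l with
      | nil => simp [PySem.Chars.replace.go]
      | cons c t =>
        rw [PySem.Chars.replace.go]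
        conv_rhs => rw [List.length_cons, PySem.Chars.replace.go]
        have h1 : 1 ≤ old.length := List.length_pos_iff.mpr h
        have hlt : t.length < f + 1 := by simp at hl; omega
        split_ifs with hp
        · have hd : (List.drop old.length (c :: t)).length ≤ t.length := by
            simp; omega
          rw [ih f (by omega) _ _ (le_trans hd (by omega)),
              ih t.length hlt _ _ hd]
          simp
        · rw [ih f (by omega) t (c :: acc) (by omega),
              ih t.length hlt t [c] (by omega)]
          simp

-- step equations for PySem.Chars.replace
theorem pvReplaceNil (old new : List Char) (h : old ≠ []) :
    PySem.Chars.replace [] old new = [] := by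
  simp [PySem.Chars.replace, h, PySem.Chars.replace.go]

theorem pvReplacePre (old new l : List Char) (h : old ≠ []) (hp : old.isPrefixOf l = true) :
    PySem.Chars.replace l old new = new ++ PySem.Chars.replace (l.drop old.length) old new := by
  cases l with
  | nil =>
    cases old with
    | nil => exact absurd rfl h
    | cons o os => simp [List.isPrefixOf] at hp
  | cons c t =>
    have hne : old.isEmpty = false := by simpa [List.isEmpty_iff] using h
    have h1 : 1 ≤ old.length := List.length_pos_iff.mpr h
    simp only [PySem.Chars.replace, hne, Bool.false_eq_true, if_false]
    rw [List.length_cons, PySem.Chars.replace.go]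
    simp only [hp, if_true]
    have hd : (List.drop old.length (c :: t)).length ≤ t.length := by simp; omega
    rw [pvGoNorm old new h t.length _ _ hd]
    simp

theorem pvReplaceCons (old new : List Char) (c : Char) (t : List Char) (h : old ≠ [])
    (hp : old.isPrefixOf (c :: t) = false) :
    PySem.Chars.replace (c :: t) old new = c :: PySem.Chars.replace t old new := by
  have hne : old.isEmpty = false := by simpa [List.isEmpty_iff] using h
  simp only [PySem.Chars.replace, hne, Bool.false_eq_true, if_false]
  rw [List.length_cons, PySem.Chars.replace.go]
  simp only [hp, Bool.false_eq_true, if_false]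
  rw [pvGoNorm old new h t.length t [c] (by omega)]
  simp

-- the two passes of A, over char lists
def pvS1 (l : List Char) : List Char :=
  PySem.Chars.replace l ['s','e','x','u','a','l'] ['x','x','x','x','x','x']
def pvS2 (l : List Char) : List Char :=
  PySem.Chars.replace l ['s','e','x'] ['x','x','x']

theorem pvS1_nil : pvS1 [] = [] := pvReplaceNil _ _ (by simp)

theorem pvS1_sexual (u : List Char) :
    pvS1 ('s'::'e'::'x'::'u'::'a'::'l'::u) = 'x'::'x'::'x'::'x'::'x'::'x':: pvS1 u := by
  rw [pvS1, pvReplacePre _ _ _ (by simp) (by simp [List.isPrefixOf])]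
  rfl

theorem pvS1_cons (c : Char) (t : List Char)
    (h : (['s','e','x','u','a','l'] : List Char).isPrefixOf (c :: t) = false) :
    pvS1 (c :: t) = c :: pvS1 t :=
  pvReplaceCons _ _ _ _ (by simp) h

theorem pvS2_nil : pvS2 [] = [] := pvReplaceNil _ _ (by simp)

theorem pvS2_sex (u : List Char) :
    pvS2 ('s'::'e'::'x':: u) = 'x'::'x'::'x':: pvS2 u := by
  rw [pvS2, pvReplacePre _ _ _ (by simp) (by simp [List.isPrefixOf])]
  rfl

theorem pvS2_cons (c : Char) (t : List Char)
    (h : (['s','e','x'] : List Char).isPrefixOf (c :: t) = false) :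
    pvS2 (c :: t) = c :: pvS2 t :=
  pvReplaceCons _ _ _ _ (by simp) h

theorem pvS2_x (u : List Char) : pvS2 ('x' :: u) = 'x' :: pvS2 u :=
  pvS2_cons _ _ (by simp [List.isPrefixOf])

-- how a cons can arise from the first pass
theorem pvS1_cons_inv (t : List Char) (d : Char) (v : List Char) (h : pvS1 t = d :: v) :
    ((['s','e','x','u','a','l'] : List Char).isPrefixOf t = true ∧ d = 'x')
      ∨ (∃ t', t = d :: t' ∧ v = pvS1 t') := by
  cases t with
  | nil => rw [pvS1_nil] at h; exact absurd h (by simp)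
  | cons a t' =>
    by_cases hp : (['s','e','x','u','a','l'] : List Char).isPrefixOf (a :: t') = true
    · left
      rw [pvS1, pvReplacePre _ _ _ (by simp) hp] at h
      simp at h
      exact ⟨hp, h.1.symm⟩
    · right
      rw [pvS1_cons _ _ (pvBF hp)] at h
      obtain ⟨h1, h2⟩ := List.cons.inj h
      exact ⟨t', by rw [h1], h2.symm⟩

-- the scanner decides the infix relation
theorem pvHasSesexual_iff (l : List Char) :
    pvHasSesexual l = true ↔ (['s','e','s','e','x','u','a','l'] : List Char) <:+: l := by
  induction l using pvHasSesexual.induct with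
  | case1 u => simp [pvHasSesexual]
               exact ⟨[], u, rfl⟩
  | case2 c t h ih =>
    have hnp : ¬ (['s','e','s','e','x','u','a','l'] : List Char) <+: c :: t := by
      rintro ⟨u, hu⟩
      simp only [List.cons_append, List.nil_append] at hu
      obtain ⟨h1, h2⟩ := List.cons.inj hu
      exact h u h1.symm h2.symm
    have hstep : pvHasSesexual (c :: t) = pvHasSesexual t := by
      rw [pvHasSesexual.eq_def]
      split
      · rename_i u heq
        exact absurd (by exact ⟨u, by simp [← heq]⟩) hnp
      · rename_i heq
        obtain ⟨_, h2⟩ := List.cons.inj heq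
        rw [h2]
      · simp_all
    rw [hstep, ih, List.infix_cons_iff]
    constructor
    · exact Or.inr
    · rintro (hp | hi)
      · exact absurd hp hnp
      · exact hi
  | case3 => simp [pvHasSesexual]

-- infix-freeness passes to suffixes obtained by drop
theorem pvNoInfix_drop (p l : List Char) (k : Nat) (h : ¬ p <:+: l) :
    ¬ p <:+: l.drop k := by
  intro hk
  exact h (hk.trans (List.drop_suffix k l).isInfix)

-- on "sesexual"-free inputs the one-pass scan computes A's two passes composed
theorem pvMain (l : List Char)
    (hD : ¬ (['s','e','s','e','x','u','a','l'] : List Char) <:+: l) :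
    pvScan l = pvS2 (pvS1 l) := by
  revert hD
  induction l using pvScan.induct with
  | case1 => intro _; rw [pvScan, pvS1_nil, pvS2_nil]
  | case2 c t hp ih =>
    intro hD
    rw [pvLitSexual] at hp
    obtain ⟨u, hu⟩ := List.isPrefixOf_iff_prefix.mp hp
    obtain ⟨rfl, rfl⟩ : c = 's' ∧ t = 'e'::'x'::'u'::'a'::'l'::u := by simpa using hu.symm
    rw [pvScan, if_pos (by rw [pvLitSexual]; exact hp), pvLitX6,
        show List.drop 5 ('e'::'x'::'u'::'a'::'l'::u) = u from rfl] at *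
    rw [pvS1_sexual, pvS2_x, pvS2_x, pvS2_x, pvS2_x, pvS2_x, pvS2_x,
        ← ih (pvNoInfix_drop _ _ 6 hD)]
    rfl
  | case3 c t hp1 hp ih =>
    intro hD
    rw [pvLitSex] at hp
    obtain ⟨u, hu⟩ := List.isPrefixOf_iff_prefix.mp hp
    obtain ⟨rfl, rfl⟩ : c = 's' ∧ t = 'e'::'x'::u := by simpa using hu.symm
    have hns : (['s','e','x','u','a','l'] : List Char).isPrefixOf ('s'::'e'::'x'::u) = false := by
      rw [pvLitSexual] at hp1
      exact pvBF hp1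
    rw [pvScan, if_neg hp1, if_pos (by rw [pvLitSex]; exact hp), pvLitX3,
        show List.drop 2 ('e'::'x'::u) = u from rfl] at *
    rw [pvS1_cons _ _ hns, pvS1_cons _ _ (by simp [List.isPrefixOf]),
        pvS1_cons _ _ (by simp [List.isPrefixOf]), pvS2_sex,
        ← ih (pvNoInfix_drop _ _ 3 hD)]
    rfl
  | case4 c t hp1 hp2 ih =>
    intro hD
    rw [pvScan, if_neg hp1, if_neg hp2]
    rw [pvLitSexual] at hp1
    rw [pvLitSex] at hp2
    rw [pvS1_cons _ _ (pvBF hp1)]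
    -- the second pass cannot match "sex" at this position (that would need a "sesexual"
    -- infix, excluded by hD, or a "sex"/"sexual" prefix, excluded by hp1/hp2)
    have hno : (['s','e','x'] : List Char).isPrefixOf (c :: pvS1 t) = false := by
      cases hb : (['s','e','x'] : List Char).isPrefixOf (c :: pvS1 t) with
      | false => rfl
      | true =>
      exfalso
      obtain ⟨w, hw⟩ := List.isPrefixOf_iff_prefix.mp hb
      simp only [List.cons_append, List.nil_append] at hw
      obtain ⟨h1, h2⟩ := List.cons.inj hw
      subst h1
      have hw1 : pvS1 t = 'e'::'x'::w := h2.symm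
      rcases pvS1_cons_inv t 'e' ('x'::w) hw1 with ⟨_, hxe⟩ | ⟨t1, rfl, hv1⟩
      · exact absurd hxe (by decide)
      rcases pvS1_cons_inv t1 'x' w hv1.symm with ⟨hsx, _⟩ | ⟨t2, rfl, _⟩
      · -- t1 starts with "sexual": then "sesexual" is a prefix of 's'::'e'::t1, hence an infix
        apply hD
        obtain ⟨u, hu⟩ := List.isPrefixOf_iff_prefix.mp hsx
        exact ⟨[], u, by rw [← hu]; rfl⟩
      · -- t1 = 'x' :: t2: then "sex" was a prefix of c :: t
        apply absurd hp2
        simp [List.isPrefixOf]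
    rw [pvS2_cons _ _ hno, ih (pvNoInfix_drop _ _ 1 hD)]

-- unrolled scanner steps, as Boolean equations
theorem pvHas_eq (c : Char) (t : List Char) :
    pvHasSesexual (c :: t)
      = ((['s','e','s','e','x','u','a','l'] : List Char).isPrefixOf (c :: t) || pvHasSesexual t) := by
  rw [Bool.eq_iff_iff]
  simp [pvHasSesexual_iff, List.infix_cons_iff, List.isPrefixOf_iff_prefix]

theorem pvHas6 (u : List Char) :
    pvHasSesexual ('s'::'e'::'x'::'u'::'a'::'l'::u) = pvHasSesexual u := by
  simp [pvHas_eq, List.isPrefixOf]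

theorem pvHas3 (u : List Char) :
    pvHasSesexual ('s'::'e'::'x'::u) = pvHasSesexual u := by
  simp [pvHas_eq, List.isPrefixOf]

-- " ".join preserves the count of 's'
theorem pvCountInter (parts : List (List Char)) :
    (([' '] : List Char).intercalate parts).count 's' = parts.flatten.count 's' := by
  induction parts with
  | nil => simp [List.intercalate]
  | cons p ps ih =>
    cases ps with
    | nil => simp [List.intercalate]
    | cons q qs =>
      rw [show ([' '] : List Char).intercalate (p :: q :: qs)
            = p ++ [' '] ++ ([' '] : List Char).intercalate (q :: qs) from by
          simp [List.intercalate, List.intersperse]]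
      simp only [List.count_append, List.flatten_cons] at *
      simp [ih]

-- split() keeps exactly the non-whitespace characters, in order
theorem pvGoFlatten (s : List Char) : ∀ cur acc,
    (PySem.Chars.split₀.go s cur acc).flatten
      = acc.reverse.flatten ++ cur.reverse ++ s.filter (fun c => !PySem.Chars.isspace c) := by
  induction s with
  | nil =>
    intro cur acc
    rw [PySem.Chars.split₀.go]
    split_ifs with h
    · simp [List.isEmpty_iff.mp h]
    · simp
  | cons c rest ih =>
    intro cur acc
    rw [PySem.Chars.split₀.go]
    split_ifs with h1 h2
    · rw [ih, List.isEmpty_iff.mp h2]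
      simp [h1]
    · rw [ih]
      simp [h1]
    · rw [ih]
      simp [h1]

-- " ".join(s.split()) preserves the count of 's'
theorem pvCountFinal (s : String) :
    (PySem.Str.join " " (PySem.Str.split₀ s)).toList.count 's' = s.toList.count 's' := by
  rw [PySem.Str.toList_join, PySem.Str.split₀_map_toList]
  rw [show (" ".toList) = [' '] from by decide]
  show (([' '] : List Char).intercalate (PySem.Chars.split₀ s.toList)).count 's' = _
  rw [pvCountInter]
  show (PySem.Chars.split₀.go s.toList [] []).flatten.count 's' = _
  rw [pvGoFlatten]
  simp only [List.reverse_nil, List.flatten_nil, List.nil_append]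
  exact List.count_filter (by decide)

-- A's composed passes never have more 's' characters than the one-pass scan,
-- and strictly fewer as soon as "sesexual" occurs
theorem pvCount (l : List Char) :
    (pvS2 (pvS1 l)).count 's' ≤ (pvScan l).count 's'
    ∧ (pvHasSesexual l = true → (pvS2 (pvS1 l)).count 's' < (pvScan l).count 's') := by
  induction l using pvScan.induct with
  | case1 => simp [pvScan, pvS1_nil, pvS2_nil, pvHasSesexual]
  | case2 c t hp ih =>
    rw [pvLitSexual] at hp
    obtain ⟨u, hu⟩ := List.isPrefixOf_iff_prefix.mp hp
    obtain ⟨rfl, rfl⟩ : c = 's' ∧ t = 'e'::'x'::'u'::'a'::'l'::u := by simpa using hu.symm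
    rw [show List.drop 5 ('e'::'x'::'u'::'a'::'l'::u) = u from rfl] at ih
    have hscan : pvScan ('s'::'e'::'x'::'u'::'a'::'l'::u) = 'x'::'x'::'x'::'x'::'x'::'x'::pvScan u := by
      rw [pvScan, if_pos (by rw [pvLitSexual]; exact hp)]
      rfl
    have hAB : pvS2 (pvS1 ('s'::'e'::'x'::'u'::'a'::'l'::u))
        = 'x'::'x'::'x'::'x'::'x'::'x'::pvS2 (pvS1 u) := by
      rw [pvS1_sexual, pvS2_x, pvS2_x, pvS2_x, pvS2_x, pvS2_x, pvS2_x]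
    rw [hscan, hAB, pvHas6]
    simp only [List.count_cons]
    obtain ⟨ih1, ih2⟩ := ih
    refine ⟨by simp; omega, fun h => by have := ih2 h; simp; omega⟩
  | case3 c t hp1 hp ih =>
    rw [pvLitSex] at hp
    obtain ⟨u, hu⟩ := List.isPrefixOf_iff_prefix.mp hp
    obtain ⟨rfl, rfl⟩ : c = 's' ∧ t = 'e'::'x'::u := by simpa using hu.symm
    rw [show List.drop 2 ('e'::'x'::u) = u from rfl] at ih
    have hns : (['s','e','x','u','a','l'] : List Char).isPrefixOf ('s'::'e'::'x'::u) = false := by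
      rw [pvLitSexual] at hp1
      exact pvBF hp1
    have hscan : pvScan ('s'::'e'::'x'::u) = 'x'::'x'::'x'::pvScan u := by
      rw [pvScan, if_neg hp1, if_pos (by rw [pvLitSex]; exact hp)]
      rfl
    have hAB : pvS2 (pvS1 ('s'::'e'::'x'::u)) = 'x'::'x'::'x'::pvS2 (pvS1 u) := by
      rw [pvS1_cons _ _ hns, pvS1_cons _ _ (by simp [List.isPrefixOf]),
          pvS1_cons _ _ (by simp [List.isPrefixOf]), pvS2_sex]
    rw [hscan, hAB, pvHas3]
    simp only [List.count_cons]
    obtain ⟨ih1, ih2⟩ := ih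
    refine ⟨by simp; omega, fun h => by have := ih2 h; simp; omega⟩
  | case4 c t hp1 hp2 ih =>
    have hp1' : (['s','e','x','u','a','l'] : List Char).isPrefixOf (c :: t) = false := by
      rw [pvLitSexual] at hp1
      exact pvBF hp1
    have hscan : pvScan (c :: t) = c :: pvScan t := by
      rw [pvScan, if_neg hp1, if_neg hp2]
    have hS1 : pvS1 (c :: t) = c :: pvS1 t := pvS1_cons _ _ hp1'
    obtain ⟨ih1, ih2⟩ := ih
    by_cases hb : (['s','e','x'] : List Char).isPrefixOf (c :: pvS1 t) = true
    · -- the cascade: hb forces l = "sesexual" ++ u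
      obtain ⟨w, hw⟩ := List.isPrefixOf_iff_prefix.mp hb
      simp only [List.cons_append, List.nil_append] at hw
      obtain ⟨h1, h2⟩ := List.cons.inj hw
      subst h1
      have hw1 : pvS1 t = 'e'::'x'::w := h2.symm
      rcases pvS1_cons_inv t 'e' ('x'::w) hw1 with ⟨_, hxe⟩ | ⟨t1, rfl, hv1⟩
      · exact absurd hxe (by decide)
      rcases pvS1_cons_inv t1 'x' w hv1.symm with ⟨hsx, _⟩ | ⟨t2, rfl, _⟩
      · -- t1 = "sexual" ++ u
        obtain ⟨u, hu⟩ := List.isPrefixOf_iff_prefix.mp hsx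
        obtain rfl : t1 = 's'::'e'::'x'::'u'::'a'::'l'::u := by rw [← hu]; rfl
        have hS1t : pvS1 ('e'::'s'::'e'::'x'::'u'::'a'::'l'::u)
            = 'e'::'x'::'x'::'x'::'x'::'x'::'x'::pvS1 u := by
          rw [pvS1_cons _ _ (by simp [List.isPrefixOf]), pvS1_sexual]
        have hC't : pvS2 (pvS1 ('e'::'s'::'e'::'x'::'u'::'a'::'l'::u))
            = 'e'::'x'::'x'::'x'::'x'::'x'::'x'::pvS2 (pvS1 u) := by
          rw [hS1t, pvS2_cons _ _ (by simp [List.isPrefixOf]),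
              pvS2_x, pvS2_x, pvS2_x, pvS2_x, pvS2_x, pvS2_x]
        have hC'l : pvS2 (pvS1 ('s'::'e'::'s'::'e'::'x'::'u'::'a'::'l'::u))
            = 'x'::'x'::'x'::'x'::'x'::'x'::'x'::'x'::pvS2 (pvS1 u) := by
          rw [hS1, hS1t, pvS2_sex, pvS2_x, pvS2_x, pvS2_x, pvS2_x, pvS2_x]
        rw [hscan, hC'l]
        have hct : (pvS2 (pvS1 ('e'::'s'::'e'::'x'::'u'::'a'::'l'::u))).count 's'
            = (pvS2 (pvS1 u)).count 's' := by
          rw [hC't]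
          simp
        rw [hct] at ih1
        constructor
        · simp only [List.count_cons]
          simp
          omega
        · intro _
          simp only [List.count_cons]
          simp
          omega
      · refine absurd (?_ : (['s','e','x'] : List Char).isPrefixOf ('s'::'e'::'x'::t2) = true) ?_
        · simp [List.isPrefixOf]
        · rw [pvLitSex] at hp2
          exact hp2
    · have hs2 : pvS2 (pvS1 (c :: t)) = c :: pvS2 (pvS1 t) := by
        rw [hS1, pvS2_cons _ _ (pvBF hb)]
      have hpre8 : (['s','e','s','e','x','u','a','l'] : List Char).isPrefixOf (c :: t) = false := by
        cases hq : (['s','e','s','e','x','u','a','l'] : List Char).isPrefixOf (c :: t) with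
        | false => rfl
        | true =>
          exfalso
          obtain ⟨u, hu⟩ := List.isPrefixOf_iff_prefix.mp hq
          simp only [List.cons_append, List.nil_append] at hu
          obtain ⟨h1, h2⟩ := List.cons.inj hu
          subst h1
          obtain rfl : t = 'e'::'s'::'e'::'x'::'u'::'a'::'l'::u := h2.symm
          apply hb
          rw [pvS1_cons _ _ (by simp [List.isPrefixOf]), pvS1_sexual]
          simp [List.isPrefixOf]
      rw [hscan, hs2, pvHas_eq, hpre8]
      simp only [Bool.false_or, List.count_cons]
      refine ⟨by omega, fun h => by have := ih2 h; omega⟩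

-- ===== VERDICT (by name: the statement is the Claim_ definition above) =====
theorem replace_disallowed_words_spec : Claim_unchanged_replace_disallowed_words := by
  intro text _ hD
  unfold D_replace_disallowed_words at hD
  rw [pvHasSesexual_iff] at hD
  unfold replace_disallowed_words replace_disallowed_words_alt
  have hkey : (PySem.Str.replace (PySem.Str.replace text "sexual" "xxxxxx") "sex" "xxx")
      = String.ofList (pvScan text.toList) := by
    have h2 : (PySem.Str.replace (PySem.Str.replace text "sexual" "xxxxxx") "sex" "xxx").toList
        = pvScan text.toList := by
      rw [PySem.Str.toList_replace, PySem.Str.toList_replace,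
          pvLitSexual, pvLitSex, pvLitX6, pvLitX3, ← pvS1, ← pvS2,
          ← pvMain _ hD]
    rw [← h2, String.ofList_toList]
  show PySem.Str.join " " (PySem.Str.split₀
      (PySem.Str.replace (PySem.Str.replace text "sexual" "xxxxxx") "sex" "xxx"))
    = PySem.Str.join " " (PySem.Str.split₀ (String.ofList (pvScan text.toList)))
  rw [hkey]

theorem replace_disallowed_words_changed : Claim_changed_replace_disallowed_words := by
  unfold Claim_changed_replace_disallowed_words
  refine ⟨by decide, by decide, rfl, ?_, by decide⟩
  have h : pvScan "sesexual".toList = "sexxxxxx".toList := by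
    rw [show "sesexual".toList = ['s','e','s','e','x','u','a','l'] from by decide]
    rw [pvScan, if_neg (by decide), if_neg (by decide)]
    rw [pvScan, if_neg (by decide), if_neg (by decide)]
    rw [pvScan, if_pos (by decide),
        show List.drop 5 (['e','x','u','a','l'] : List Char) = [] from by decide]
    rw [pvScan]
    decide
  show replace_disallowed_words_alt "sesexual" = "sexxxxxx"
  unfold replace_disallowed_words_alt
  rw [h]
  rfl

theorem replace_disallowed_words_tight : Claim_exact_replace_disallowed_words := by
  intro text _ hD heq
  unfold D_replace_disallowed_words at hD
  have hA : (replace_disallowed_words text).toList.count 's'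
      = (pvS2 (pvS1 text.toList)).count 's' := by
    show (PySem.Str.join " " (PySem.Str.split₀
        (PySem.Str.replace (PySem.Str.replace text "sexual" "xxxxxx") "sex" "xxx"))).toList.count 's' = _
    rw [pvCountFinal, PySem.Str.toList_replace, PySem.Str.toList_replace,
        pvLitSexual, pvLitSex, pvLitX6, pvLitX3, ← pvS1, ← pvS2]
  have hB : (replace_disallowed_words_alt text).toList.count 's'
      = (pvScan text.toList).count 's' := by
    show (PySem.Str.join " " (PySem.Str.split₀
        (String.ofList (pvScan text.toList)))).toList.count 's' = _
    rw [pvCountFinal, String.toList_ofList]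
  have hlt := (pvCount text.toList).2 hD
  rw [heq, hB] at hA
  omega
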